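-- pv_equiv track=rewrite | github.com/sermetsim/metal_complex | src/Prog_complex_project_comments.py | simplify_idx
-- ===== SOURCE A (Python) =====
-- import copy as cp
--
-- def simplify_idx(idx_list, smiles_list):
--     '''
--     parameters: idx_list - a list of index lists
--                 smiles_list - a list of SMILES string
--     returns: ist of adjusted index lists
--     usage: adjusts indices in idx_list to account for removed characters from the corresponding SMILES strings '''
--
--     copy_list = cp.deepcopy(idx_list)
--     new_list = cp.deepcopy(idx_list)
--     for k in range(len(smiles_list)):
--         for i in range(len(smiles_list[k])):
--             if smiles_list[k][i] == 'H':
--                 for j in range(len(idx_list[k])):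
--                     if copy_list[k][j] > i:
--                         new_list[k][j] -= 1
--     return new_list
-- ===== SOURCE B (Python) =====
-- def simplify_idx(idx_list, smiles_list):
--     res = []
--     for k, idxs in enumerate(idx_list):
--         if k < len(smiles_list):
--             s = smiles_list[k]
--             pref = [0]
--             c = 0
--             for ch in s:
--                 c += (ch == 'H')
--                 pref.append(c)
--             n = len(s)
--             res.append([x - pref[0 if x < 0 else (n if x > n else x)] for x in idxs])
--         else:
--             res.append(list(idxs))
--     return res
-- ===== Notes on version B (the rewrite author's own statement) =====
-- stated objective: faster
-- what changed: Instead of triple-nested loops that decrement every index once per 'H' character, B builds one prefix-sum array of 'H' counts per SMILES string and adjusts each index with a single O(1) clamped lookup.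
import Mathlib
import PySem

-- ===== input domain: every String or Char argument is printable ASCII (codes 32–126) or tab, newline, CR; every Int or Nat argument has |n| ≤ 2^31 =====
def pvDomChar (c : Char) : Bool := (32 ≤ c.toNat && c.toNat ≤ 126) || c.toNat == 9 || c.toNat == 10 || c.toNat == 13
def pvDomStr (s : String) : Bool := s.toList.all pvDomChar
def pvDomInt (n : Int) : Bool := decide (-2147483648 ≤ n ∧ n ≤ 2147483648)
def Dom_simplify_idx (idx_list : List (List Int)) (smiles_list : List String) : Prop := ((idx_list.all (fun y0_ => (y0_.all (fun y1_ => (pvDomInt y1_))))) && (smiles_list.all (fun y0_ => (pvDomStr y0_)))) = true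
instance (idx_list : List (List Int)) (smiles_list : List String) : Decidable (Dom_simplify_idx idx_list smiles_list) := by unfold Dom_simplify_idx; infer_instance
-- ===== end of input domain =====

-- B replaces A's triple-nested decrement loops by one prefix-sum array of 'H' counts per
-- SMILES string, adjusting each index with a single clamped lookup (asymptotically faster).
-- Return-value equivalence only: A returns fresh lists (deepcopy) and mutates no argument, as does B.

-- ===== PORT A =====
def simplify_idx (idx_list : List (List Int)) (smiles_list : List String) : List (List Int) :=
  (List.range smiles_list.length).foldl (fun new_list k =>
    (List.range (smiles_list.getD k "").toList.length).foldl (fun new_list i =>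
      if (smiles_list.getD k "").toList.getD i ' ' = 'H' then
        (List.range (idx_list.getD k []).length).foldl (fun new_list j =>
          if (idx_list.getD k []).getD j 0 > (i : Int) then
            new_list.set k ((new_list.getD k []).set j ((new_list.getD k []).getD j 0 - 1))
          else new_list) new_list
      else new_list) new_list) idx_list

-- ===== PORT B =====
def simplify_idx_alt (idx_list : List (List Int)) (smiles_list : List String) : List (List Int) :=
  idx_list.zipIdx.foldl (fun res p =>
    if p.2 < smiles_list.length then
      let s := (smiles_list.getD p.2 "").toList
      let pc := s.foldl (fun (st : List Int × Int) ch =>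
        (st.1 ++ [st.2 + (if ch = 'H' then 1 else 0)], st.2 + (if ch = 'H' then 1 else 0))) ([0], 0)
      res ++ [p.1.map (fun x =>
        x - pc.1.getD (if x < 0 then 0 else if x > (s.length : Int) then s.length else x.toNat) 0)]
    else res ++ [p.1]) []

-- ===== PRECONDITION & SPEC =====
-- Pre_ excludes exactly the inputs on which A raises IndexError: a SMILES string with no
-- corresponding index list (position ≥ len(idx_list)) that contains 'H' makes A index idx_list[k].
def Pre_simplify_idx (idx_list : List (List Int)) (smiles_list : List String) : Prop :=
  ∀ s ∈ smiles_list.drop idx_list.length, PySem.Str.isIn "H" s = false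
instance (idx_list : List (List Int)) (smiles_list : List String) : Decidable (Pre_simplify_idx idx_list smiles_list) := by unfold Pre_simplify_idx; infer_instance

def pvWitness_simplify_idx : List (List Int) × List String := ([[1, 3, 7]], ["CH(H)O"])

def Spec_simplify_idx (idx_list : List (List Int)) (smiles_list : List String) (out : List (List Int)) : Prop := out = simplify_idx_alt idx_list smiles_list
instance (idx_list : List (List Int)) (smiles_list : List String) (out : List (List Int)) : Decidable (Spec_simplify_idx idx_list smiles_list out) := by unfold Spec_simplify_idx; infer_instance

-- ===== CLAIM (what is proved, stated in full; the proofs are below) =====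
def Claim_equal_simplify_idx : Prop := ∀ (idx_list : List (List Int)) (smiles_list : List String), Dom_simplify_idx idx_list smiles_list → Pre_simplify_idx idx_list smiles_list → Spec_simplify_idx idx_list smiles_list (simplify_idx idx_list smiles_list)

-- ===== LEMMAS AND PROOFS =====

-- A's inner j-loop body on one row
def jstepL (orig : List Int) (i : Nat) (row : List Int) (j : Nat) : List Int :=
  if orig.getD j 0 > (i : Int) then row.set j (row.getD j 0 - 1) else row

-- A's i-loop body on one row
def istepL (orig : List Int) (s : List Char) (row : List Int) (i : Nat) : List Int :=
  if s.getD i ' ' = 'H' then (List.range orig.length).foldl (jstepL orig i) row else row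

-- what A does to row k
def frowA (idx_list : List (List Int)) (smiles_list : List String) (k : Nat) (row : List Int) : List Int :=
  (List.range (smiles_list.getD k "").toList.length).foldl
    (istepL (idx_list.getD k []) (smiles_list.getD k "").toList) row

-- number of 'H' positions of s strictly below x
def cntH (s : List Char) (x : Int) : Nat :=
  (List.range s.length).countP (fun i => decide (s.getD i ' ' = 'H') && decide ((i : Int) < x))

def clampN (n : Nat) (x : Int) : Nat :=
  if x < 0 then 0 else if x > (n : Int) then n else x.toNat

lemma getD_set {α : Type} (l : List α) (m j : Nat) (a d : α) :
    (l.set m a).getD j d = if j = m ∧ m < l.length then a else l.getD j d := by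
  simp only [List.getD, List.getElem?_set]
  split_ifs with h1 h2 h3 h4 h5 <;> simp_all

lemma set_getD_self (nl : List (List Int)) (k : Nat) : nl.set k (nl.getD k []) = nl := by
  rcases Nat.lt_or_ge k nl.length with h | h
  · rw [List.getD_eq_getElem _ _ h]; exact List.set_getElem_self ..
  · exact List.set_eq_of_length_le h

lemma foldl_lift {β : Type} (L : List β) (f : List Int → β → List Int)
    (nl : List (List Int)) (k : Nat) :
    L.foldl (fun nl x => nl.set k (f (nl.getD k []) x)) nl
      = nl.set k (L.foldl f (nl.getD k [])) := by
  induction L generalizing nl with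
  | nil => exact (set_getD_self nl k).symm
  | cons x L ih =>
    rcases Nat.lt_or_ge k nl.length with h | h
    · simp only [List.foldl_cons, ih, List.set_set]
      congr 1
      rw [List.getD_eq_getElem _ _ (by simpa using h)]
      simp [h]
    · have hset : ∀ v, nl.set k v = nl := fun v => List.set_eq_of_length_le h
      simp only [List.foldl_cons, hset, ih]

lemma jfold_length (orig row : List Int) (i m : Nat) :
    ((List.range m).foldl (jstepL orig i) row).length = row.length := by
  induction m with
  | zero => rfl
  | succ m ih =>
    rw [List.range_succ, List.foldl_append]
    simp only [List.foldl_cons, List.foldl_nil, jstepL]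
    split <;> simp [ih]

lemma jfold_getD (orig row : List Int) (i m : Nat) :
    ∀ j', ((List.range m).foldl (jstepL orig i) row).getD j' 0
      = if j' < m ∧ j' < row.length ∧ orig.getD j' 0 > (i : Int)
        then row.getD j' 0 - 1 else row.getD j' 0 := by
  induction m with
  | zero => simp
  | succ m ih =>
    intro j'
    rw [List.range_succ, List.foldl_append]
    simp only [List.foldl_cons, List.foldl_nil, jstepL]
    have hlen := jfold_length orig row i m
    by_cases hj : j' = m
    · subst hj
      by_cases hc : orig.getD j' 0 > (i : Int)
      · rw [if_pos hc, getD_set (d := 0), hlen]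
        by_cases hl : j' < row.length
        · rw [if_pos ⟨rfl, hl⟩, ih j', if_neg (fun h => Nat.lt_irrefl j' h.1),
            if_pos ⟨Nat.lt_succ_self _, hl, hc⟩]
        · rw [if_neg (fun h => hl h.2), ih j', if_neg (fun h => Nat.lt_irrefl j' h.1),
            if_neg (fun h => hl h.2.1)]
      · rw [if_neg hc, ih j', if_neg (fun h => Nat.lt_irrefl j' h.1), if_neg (fun h => hc h.2.2)]
    · by_cases hc : orig.getD m 0 > (i : Int)
      · rw [if_pos hc, getD_set (d := 0), if_neg (fun h => hj h.1), ih j']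
        by_cases h1 : j' < m ∧ j' < row.length ∧ orig.getD j' 0 > (i : Int)
        · rw [if_pos h1, if_pos ⟨Nat.lt_succ_of_lt h1.1, h1.2⟩]
        · rw [if_neg h1, if_neg (fun h2 => h1 ⟨by omega, h2.2⟩)]
      · rw [if_neg hc, ih j']
        by_cases h1 : j' < m ∧ j' < row.length ∧ orig.getD j' 0 > (i : Int)
        · rw [if_pos h1, if_pos ⟨Nat.lt_succ_of_lt h1.1, h1.2⟩]
        · rw [if_neg h1, if_neg (fun h2 => h1 ⟨by omega, h2.2⟩)]

lemma ifold_length (orig : List Int) (s : List Char) (m : Nat) :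
    ((List.range m).foldl (istepL orig s) orig).length = orig.length := by
  induction m with
  | zero => rfl
  | succ m ih =>
    rw [List.range_succ, List.foldl_append]
    simp only [List.foldl_cons, List.foldl_nil, istepL]
    split <;> simp [jfold_length, ih]

lemma ifold_getD (orig : List Int) (s : List Char) (m : Nat) (j' : Nat) :
    ((List.range m).foldl (istepL orig s) orig).getD j' 0
      = orig.getD j' 0
        - ((List.range m).countP
            (fun i => decide (s.getD i ' ' = 'H') && decide ((i : Int) < orig.getD j' 0)) : Int) := by
  induction m with
  | zero => simp
  | succ m ih =>
    rw [List.range_succ, List.foldl_append, List.countP_append]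
    simp only [List.foldl_cons, List.foldl_nil, istepL,
      List.countP_cons, List.countP_nil, Nat.zero_add]
    have hlen := ifold_length orig s m
    have hout : ¬ j' < orig.length → orig.getD j' 0 = 0 := by
      intro h
      rw [List.getD_eq_getElem?_getD, List.getElem?_eq_none (by omega)]; rfl
    by_cases hH : s.getD m ' ' = 'H'
    · rw [if_pos hH, jfold_getD, hlen, ih]
      by_cases hj : j' < orig.length
      · by_cases hx : (m : Int) < orig.getD j' 0
        · rw [if_pos ⟨hj, hj, hx⟩]
          simp only [hH, hx, decide_true, Bool.and_self, if_true]
          push_cast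
          ring
        · rw [if_neg (fun h => hx h.2.2)]
          simp
          exact fun _ => not_lt.mp hx
      · have h0 : orig.getD j' 0 = 0 := hout hj
        rw [if_neg (fun h => hj h.1)]
        simp
        exact fun _ => le_trans (le_of_eq h0) (by positivity)
    · rw [if_neg hH, ih]
      simp
      exact fun h => absurd h hH

lemma outer_length (idx : List (List Int)) (F : Nat → List Int → List Int) (m : Nat) :
    (((List.range m).foldl (fun nl k => nl.set k (F k (nl.getD k []))) idx)).length = idx.length := by
  induction m with
  | zero => rfl
  | succ m ih =>
    rw [List.range_succ, List.foldl_append]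
    simp only [List.foldl_cons, List.foldl_nil, List.length_set]
    exact ih

lemma outer_getD (idx : List (List Int)) (F : Nat → List Int → List Int) (m : Nat) :
    ∀ k', (((List.range m).foldl (fun nl k => nl.set k (F k (nl.getD k []))) idx)).getD k' []
      = if k' < m ∧ k' < idx.length then F k' (idx.getD k' []) else idx.getD k' [] := by
  induction m with
  | zero => simp
  | succ m ih =>
    intro k'
    rw [List.range_succ, List.foldl_append]
    simp only [List.foldl_cons, List.foldl_nil]
    have hlen := outer_length idx F m
    have hrow : (((List.range m).foldl (fun nl k => nl.set k (F k (nl.getD k []))) idx)).getD m []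
        = idx.getD m [] := by
      rw [ih m, if_neg (fun h => Nat.lt_irrefl m h.1)]
    rw [getD_set (d := []), hlen, hrow, ih k']
    by_cases hk : k' = m
    · subst hk
      by_cases hl : k' < idx.length
      · rw [if_pos ⟨rfl, hl⟩, if_pos ⟨Nat.lt_succ_self _, hl⟩]
      · rw [if_neg (fun h => hl h.2), if_neg (fun h => Nat.lt_irrefl k' h.1),
          if_neg (fun h => hl h.2)]
    · rw [if_neg (fun h => hk h.1)]
      by_cases h1 : k' < m ∧ k' < idx.length
      · rw [if_pos h1, if_pos ⟨Nat.lt_succ_of_lt h1.1, h1.2⟩]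
      · rw [if_neg h1, if_neg (fun h2 => h1 ⟨by omega, h2.2⟩)]

-- rewrite A as the lifted per-row fold
lemma simplify_idx_eq_lifted (idx : List (List Int)) (sm : List String) :
    simplify_idx idx sm
      = (List.range sm.length).foldl
          (fun nl k => nl.set k (frowA idx sm k (nl.getD k []))) idx := by
  unfold simplify_idx
  congr 1
  funext nl k
  have hj : ∀ (i : Nat) (nl : List (List Int)),
      (List.range (idx.getD k []).length).foldl (fun nl j =>
        if (idx.getD k []).getD j 0 > (i : Int) then
          nl.set k ((nl.getD k []).set j ((nl.getD k []).getD j 0 - 1))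
        else nl) nl
      = nl.set k ((List.range (idx.getD k []).length).foldl (jstepL (idx.getD k []) i) (nl.getD k [])) := by
    intro i nl
    rw [show (fun (nl : List (List Int)) j =>
          if (idx.getD k []).getD j 0 > (i : Int) then
            nl.set k ((nl.getD k []).set j ((nl.getD k []).getD j 0 - 1))
          else nl)
        = (fun nl j => nl.set k (jstepL (idx.getD k []) i (nl.getD k []) j)) from ?_]
    · exact foldl_lift ..
    · funext nl j
      unfold jstepL
      split
      · rfl
      · exact (set_getD_self nl k).symm
  rw [show (fun (nl : List (List Int)) i =>
        if (sm.getD k "").toList.getD i ' ' = 'H' then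
          (List.range (idx.getD k []).length).foldl (fun nl j =>
            if (idx.getD k []).getD j 0 > (i : Int) then
              nl.set k ((nl.getD k []).set j ((nl.getD k []).getD j 0 - 1))
            else nl) nl
        else nl)
      = (fun nl i => nl.set k (istepL (idx.getD k []) (sm.getD k "").toList (nl.getD k []) i)) from ?_]
  · exact foldl_lift ..
  · funext nl i
    unfold istepL
    split
    · exact hj i nl
    · exact (set_getD_self nl k).symm

-- prefix-sum characterisation
lemma pref_spec (s : List Char) :
    s.foldl (fun (st : List Int × Int) ch =>
        (st.1 ++ [st.2 + (if ch = 'H' then 1 else 0)], st.2 + (if ch = 'H' then 1 else 0))) ([0], 0)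
      = ((List.range (s.length + 1)).map
          (fun m => (((s.take m).countP (fun ch => decide (ch = 'H'))) : Int)),
         ((s.countP (fun ch => decide (ch = 'H'))) : Int)) := by
  induction s using List.reverseRecOn with
  | nil => simp
  | append_singleton s ch ih =>
    rw [List.foldl_append]
    simp only [List.foldl_cons, List.foldl_nil, ih]
    rw [Prod.mk.injEq]
    refine ⟨?_, ?_⟩
    · conv_rhs => rw [show (s ++ [ch]).length + 1 = (s.length + 1) + 1 by simp,
        List.range_succ, List.map_append]
      congr 1
      · apply List.map_congr_left
        intro m hm
        have hle : m ≤ s.length := by simpa [Nat.lt_succ_iff] using hm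
        rw [List.take_append_of_le_length hle]
      · have : (s ++ [ch]).take (s.length + 1) = s ++ [ch] := by
          apply List.take_of_length_le
          simp
        simp [this, List.countP_append]
    · simp [List.countP_append]

lemma countP_index (l : List Char) :
    (List.range l.length).countP (fun i => decide (l.getD i ' ' = 'H'))
      = l.countP (fun ch => decide (ch = 'H')) := by
  induction l using List.reverseRecOn with
  | nil => simp
  | append_singleton l ch ih =>
    rw [List.length_append, List.length_singleton, List.range_succ, List.countP_append,
      List.countP_append]
    congr 1
    · rw [← ih]
      apply List.countP_congr
      intro i hi
      have hi' : i < l.length := by simpa using hi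
      have h2 : i < (l ++ [ch]).length := by simp; omega
      rw [List.getD_eq_getElem _ _ hi', List.getD_eq_getElem _ _ h2,
        List.getElem_append_left hi']
    · simp only [List.countP_cons, List.countP_nil, Nat.zero_add]
      have h3 : l.length < (l ++ [ch]).length := by simp
      rw [List.getD_eq_getElem _ _ h3, List.getElem_append_right (le_refl _)]
      simp

lemma cntH_eq_take (s : List Char) (x : Int) :
    cntH s x = (s.take (clampN s.length x)).countP (fun ch => decide (ch = 'H')) := by
  unfold cntH clampN
  set c : Nat := if x < 0 then 0 else if x > (s.length : Int) then s.length else x.toNat with hc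
  have hcle : c ≤ s.length := by
    rw [hc]; split_ifs <;> omega
  have h1 : (List.range s.length).countP
        (fun i => decide (s.getD i ' ' = 'H') && decide ((i : Int) < x))
      = (List.range s.length).countP
        (fun i => decide (s.getD i ' ' = 'H') && decide (i < c)) := by
    apply List.countP_congr
    intro i hi
    have hi' : i < s.length := by simpa using hi
    have : ((i : Int) < x) ↔ (i < c) := by
      rw [hc]; split_ifs <;> omega
    simp [this]
  rw [h1]
  have h2 : (List.range s.length).countP
        (fun i => decide (s.getD i ' ' = 'H') && decide (i < c))
      = (List.range c).countP (fun i => decide (s.getD i ' ' = 'H')) := by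
    rw [show s.length = c + (s.length - c) by omega, List.range_add, List.countP_append,
      List.countP_map]
    have hz : (List.range (s.length - c)).countP
        ((fun i => decide (s.getD i ' ' = 'H') && decide (i < c)) ∘ (c + ·)) = 0 := by
      apply List.countP_eq_zero.mpr
      intro i _
      simp
    rw [hz, Nat.add_zero]
    apply List.countP_congr
    intro i hi
    have : i < c := by simpa using hi
    simp [this]
  rw [h2, ← countP_index (s.take c), List.length_take, Nat.min_eq_left hcle]
  apply List.countP_congr
  intro i hi
  have hi' : i < c := by simpa using hi
  have ht : i < (s.take c).length := by rw [List.length_take]; omega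
  have hs : i < s.length := by omega
  rw [List.getD_eq_getElem _ _ ht, List.getD_eq_getElem _ _ hs, List.getElem_take]

-- per-row: A's row transformation equals B's prefix-lookup map
lemma frowA_eq_map (idx : List (List Int)) (sm : List String) (k : Nat) :
    frowA idx sm k (idx.getD k [])
      = (idx.getD k []).map (fun x => x - (cntH (sm.getD k "").toList x : Int)) := by
  unfold frowA
  apply List.ext_getElem
  · rw [ifold_length, List.length_map]
  · intro j h1 h2
    have hj : j < (idx.getD k []).length := by rw [ifold_length] at h1; exact h1
    rw [← List.getD_eq_getElem _ 0 h1, ifold_getD, List.getElem_map,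
      ← List.getD_eq_getElem _ 0 hj]
    rfl

-- B as a map over zipIdx
lemma simplify_idx_alt_eq_map (idx : List (List Int)) (sm : List String) :
    simplify_idx_alt idx sm
      = idx.zipIdx.map (fun p =>
          if p.2 < sm.length then
            p.1.map (fun x =>
              x - (cntH (sm.getD p.2 "").toList x : Int))
          else p.1) := by
  unfold simplify_idx_alt
  rw [show (fun (res : List (List Int)) (p : List Int × Nat) =>
        if p.2 < sm.length then
          let s := (sm.getD p.2 "").toList
          let pc := s.foldl (fun (st : List Int × Int) ch =>
            (st.1 ++ [st.2 + (if ch = 'H' then 1 else 0)], st.2 + (if ch = 'H' then 1 else 0))) ([0], 0)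
          res ++ [p.1.map (fun x =>
            x - pc.1.getD (if x < 0 then 0 else if x > (s.length : Int) then s.length else x.toNat) 0)]
        else res ++ [p.1])
      = (fun res p => res ++ [if p.2 < sm.length then
          p.1.map (fun x => x - (cntH (sm.getD p.2 "").toList x : Int)) else p.1]) from ?_]
  · rw [PySem.List.foldl_append_singleton_eq_map, List.nil_append]
  · funext res p
    split_ifs with h
    · simp only []
      congr 1
      congr 1
      apply List.map_congr_left
      intro x _
      set s := (sm.getD p.2 "").toList
      rw [pref_spec]
      have hcl : clampN s.length x < s.length + 1 := by
        unfold clampN; split_ifs <;> omega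
      rw [show (if x < 0 then 0 else if x > (s.length : Int) then s.length else x.toNat)
          = clampN s.length x from rfl]
      rw [List.getD_eq_getElem _ _ (by simpa using hcl), List.getElem_map, List.getElem_range,
        cntH_eq_take]
    · rfl

lemma main_eq (idx : List (List Int)) (sm : List String) :
    simplify_idx idx sm = simplify_idx_alt idx sm := by
  rw [simplify_idx_eq_lifted, simplify_idx_alt_eq_map]
  apply List.ext_getElem
  · rw [List.length_map, List.length_zipIdx]
    exact outer_length idx (frowA idx sm) sm.length
  · intro k h1 h2
    have hk : k < idx.length := by
      have hο := outer_length idx (frowA idx sm) sm.length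
      omega
    rw [← List.getD_eq_getElem _ [] h1, outer_getD idx (frowA idx sm) sm.length k,
      List.getElem_map, List.getElem_zipIdx]
    simp only [Nat.zero_add]
    by_cases hksm : k < sm.length
    · rw [if_pos ⟨hksm, hk⟩, if_pos hksm, frowA_eq_map, List.getD_eq_getElem _ _ hk]
    · rw [if_neg (fun h => hksm h.1), if_neg hksm, List.getD_eq_getElem _ _ hk]

-- ===== VERDICT (by name: the statement is the Claim_ definition above) =====
theorem simplify_idx_spec : Claim_equal_simplify_idx := by
  intro idx sm _ _
  unfold Spec_simplify_idx
  exact main_eq idx sm
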